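-- pv_equiv track=rewrite | github.com/nathandecaux/actiDep | actiDep/analysis/summarize_tractometry.py | expand_12h_features
-- ===== SOURCE A (Python) =====
-- def expand_12h_features(selected_features, all_features):
--     """Expand features ending with _12h to include all time slices (_12h_1 to _12h_6)."""
--     expanded = []
--
--     for feature in selected_features:
--         if feature.endswith('_12h'):
--             # Chercher les variantes avec tranches horaires
--             base = feature  # ex: activity_mean_12h
--             found_variants = False
--             for n in range(1, 7):  # tranches 1 à 6
--                 variant = f"{base}_{n}"
--                 if variant in all_features:
--                     expanded.append(variant)
--                     found_variants = True
--
--             if not found_variants: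
--                 # Si aucune variante trouvée, garder l'originale
--                 expanded.append(feature)
--         else:
--             expanded.append(feature)
--
--     return list(set(expanded))  # Dédupliquer
-- ===== SOURCE B (Python) =====
-- def expand_12h_features(selected_features, all_features):
--     """Expand features ending with _12h to include all time slices (_12h_1 to _12h_6).
--
--     One pass over all_features builds an index base -> set of digit suffixes present,
--     then one pass over selected_features emits the variants (or the feature itself)."""
--     variants = {}
--     for f in all_features:
--         if len(f) >= 2 and f[-2] == '_' and f[-1] in '123456' and f[:-2].endswith('_12h'):
--             variants.setdefault(f[:-2], set()).add(f[-1])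
--     expanded = []
--     for feature in selected_features:
--         if feature.endswith('_12h') and feature in variants:
--             for d in sorted(variants[feature]):
--                 expanded.append(feature + '_' + d)
--         else:
--             expanded.append(feature)
--     return list(set(expanded))
-- ===== Notes on version B (the rewrite author's own statement) =====
-- stated objective: alternative
-- what changed: Instead of scanning all_features six times per selected '_12h' feature, B makes one pass over all_features building a dict from each base to the set of digit suffixes 1-6 present, then one pass over selected_features emitting the indexed variants (or the feature itself); it trades repeated list scans for a pre-built index.
import Mathlib
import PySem

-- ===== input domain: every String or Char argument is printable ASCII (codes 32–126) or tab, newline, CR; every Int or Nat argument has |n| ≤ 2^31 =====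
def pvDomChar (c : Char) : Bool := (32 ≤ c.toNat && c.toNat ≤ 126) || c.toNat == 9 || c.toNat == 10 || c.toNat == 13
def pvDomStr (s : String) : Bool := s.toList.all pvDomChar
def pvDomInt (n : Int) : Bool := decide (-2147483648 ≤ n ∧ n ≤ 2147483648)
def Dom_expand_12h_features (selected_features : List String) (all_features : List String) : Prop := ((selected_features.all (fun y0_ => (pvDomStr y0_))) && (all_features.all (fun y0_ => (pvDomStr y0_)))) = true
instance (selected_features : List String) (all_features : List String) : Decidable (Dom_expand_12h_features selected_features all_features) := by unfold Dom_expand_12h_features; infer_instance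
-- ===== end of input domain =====

-- B replaces A's per-feature six-way membership scans of all_features by one indexing pass
-- over all_features (dict base -> set of digit suffixes present) and one pass over
-- selected_features; return value only (neither program mutates its arguments).

-- ===== PORT A =====
def expand_12h_features (selected_features : List String) (all_features : List String) : List String :=
  -- for feature in selected_features: …  (expanded and found_variants threaded through the inner loop)
  let expanded := selected_features.foldl (fun expanded feature =>
    if PySem.Str.endswith feature "_12h" then
      let base := feature
      let p := (PySem.List.pyRange 1 7 1).foldl (fun (p : List String × Bool) n =>
          let variant := base ++ "_" ++ PySem.Int.toStr n
          if all_features.contains variant then (p.1 ++ [variant], true) else p)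
        (expanded, false)
      if p.2 = false then p.1 ++ [feature] else p.1
    else expanded ++ [feature]) []
  PySem.Set.ofList expanded   -- list(set(expanded)); outputs are compared as finite sets

-- ===== PORT B =====
-- f[:-2]
def pvBase (cs : List Char) : List Char := PySem.List.slice cs none (some (-2))
-- len(f) >= 2 and f[-2] == '_' and f[-1] in '123456' and f[:-2].endswith('_12h')
def pvCheck (cs : List Char) : Bool :=
  decide (2 ≤ cs.length) &&
  (PySem.List.pyGet? cs (-2) == some '_') &&
  ((PySem.List.pyGet? cs (-1)).elim false (fun c => "123456".toList.contains c)) &&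
  PySem.Chars.endswith (pvBase cs) "_12h".toList
-- variants.setdefault(f[:-2], set()).add(f[-1])   (the ' ' default of f[-1] is never used: the guard holds)
def pvStep (d : PySem.Dict String (PySem.Set Char)) (f : String) : PySem.Dict String (PySem.Set Char) :=
  let cs := f.toList
  if pvCheck cs then
    d.modify (String.ofList (pvBase cs)) [] (fun s => PySem.Set.add s ((PySem.List.pyGet? cs (-1)).getD ' '))
  else d

def expand_12h_features_alt (selected_features : List String) (all_features : List String) : List String :=
  let variants := all_features.foldl pvStep PySem.Dict.empty
  let expanded := selected_features.foldl (fun acc feature =>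
    if PySem.Str.endswith feature "_12h" && variants.contains feature then
      (PySem.List.sorted (variants.getD feature []) (fun x => x) false).foldl
        (fun acc d => acc ++ [feature ++ "_" ++ String.ofList [d]]) acc
    else acc ++ [feature]) []
  PySem.Set.ofList expanded   -- list(set(expanded))

-- ===== PRECONDITION & SPEC =====
def Spec_expand_12h_features (selected_features : List String) (all_features : List String) (out : List String) : Prop := out = expand_12h_features_alt selected_features all_features
instance (selected_features : List String) (all_features : List String) (out : List String) : Decidable (Spec_expand_12h_features selected_features all_features out) := by unfold Spec_expand_12h_features; infer_instance

-- ===== CLAIM (what is proved, stated in full; the proofs are below) =====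
def Claim_equal_expand_12h_features : Prop := ∀ (selected_features : List String) (all_features : List String), Dom_expand_12h_features selected_features all_features → Spec_expand_12h_features selected_features all_features (expand_12h_features selected_features all_features)

-- ===== LEMMAS AND PROOFS =====

def pvDigits : List Char := "123456".toList
def pvVar (b : String) (c : Char) : String := b ++ "_" ++ String.ofList [c]
def pvHas (all : List String) (b : String) (c : Char) : Bool := all.contains (pvVar b c)
-- what one iteration of A's outer loop appends for a given feature
def pvSeg (all : List String) (f : String) : List String :=
  if PySem.Str.endswith f "_12h" then
    if pvDigits.any (pvHas all f) then (pvDigits.filter (pvHas all f)).map (pvVar f) else [f]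
  else [f]
-- what one iteration of B's output loop appends for a given feature
def pvSegB (v : PySem.Dict String (PySem.Set Char)) (f : String) : List String :=
  if PySem.Str.endswith f "_12h" && v.contains f then
    (PySem.List.sorted (v.getD f []) (fun x => x) false).map (fun d => f ++ "_" ++ String.ofList [d])
  else [f]

-- A's inner loop, phrased over the digit characters
lemma pvInner (all : List String) (feature : String) :
    ∀ (L : List Char) (acc : List String) (b0 : Bool),
    L.foldl (fun (p : List String × Bool) c =>
        let variant := feature ++ "_" ++ String.ofList [c]
        if all.contains variant then (p.1 ++ [variant], true) else p) (acc, b0)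
    = (acc ++ (L.filter (pvHas all feature)).map (pvVar feature), b0 || L.any (pvHas all feature)) := by
  intro L
  induction L with
  | nil => intro acc b0; simp
  | cons c t ih =>
    intro acc b0
    cases h : pvHas all feature c with
    | true =>
      have h' : all.contains (feature ++ "_" ++ String.ofList [c]) = true := h
      simp only [List.foldl_cons, h', if_pos, List.filter_cons, List.any_cons, h]
      rw [ih]
      simp [pvVar]
    | false =>
      have h' : all.contains (feature ++ "_" ++ String.ofList [c]) = false := h
      simp only [List.foldl_cons, h', List.filter_cons, List.any_cons, h]
      rw [ih]
      simp

-- A's inner loop over pyRange 1 7 1 is (definitionally) the digit-character loop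
lemma pvInnerA (all : List String) (feature : String) (acc : List String) (b0 : Bool) :
    (PySem.List.pyRange 1 7 1).foldl (fun (p : List String × Bool) n =>
        let variant := feature ++ "_" ++ PySem.Int.toStr n
        if all.contains variant then (p.1 ++ [variant], true) else p) (acc, b0)
    = (acc ++ (pvDigits.filter (pvHas all feature)).map (pvVar feature),
       b0 || pvDigits.any (pvHas all feature)) :=
  pvInner all feature pvDigits acc b0

-- one iteration of A's outer loop
lemma pvStepA_eq (all : List String) (feature : String) (acc : List String) :
    (if PySem.Str.endswith feature "_12h" then
       let base := feature
       let p := (PySem.List.pyRange 1 7 1).foldl (fun (p : List String × Bool) n =>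
           let variant := base ++ "_" ++ PySem.Int.toStr n
           if all.contains variant then (p.1 ++ [variant], true) else p)
         (acc, false)
       if p.2 = false then p.1 ++ [feature] else p.1
     else acc ++ [feature]) = acc ++ pvSeg all feature := by
  cases hend : PySem.Str.endswith feature "_12h" with
  | true =>
    rw [if_pos rfl]
    simp only [pvInnerA all feature]
    cases hany : pvDigits.any (pvHas all feature) with
    | false =>
      have hnil : pvDigits.filter (pvHas all feature) = [] := by
        rw [List.filter_eq_nil_iff]
        intro c hc hp
        rw [List.any_eq_false] at hany
        exact hany c hc hp
      rw [if_pos (by simp)]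
      unfold pvSeg
      rw [if_pos hend, if_neg (by rw [hany]; simp), hnil]
      simp
    | true =>
      rw [if_neg (by simp)]
      unfold pvSeg
      rw [if_pos hend, if_pos hany]
  | false =>
    rw [if_neg (by simp)]
    unfold pvSeg
    rw [if_neg (by rw [hend]; simp)]

-- A's outer loop appends pvSeg per feature
lemma pvFoldA (all : List String) :
    ∀ (sel : List String) (acc : List String),
    sel.foldl (fun expanded feature =>
      if PySem.Str.endswith feature "_12h" then
        let base := feature
        let p := (PySem.List.pyRange 1 7 1).foldl (fun (p : List String × Bool) n =>
            let variant := base ++ "_" ++ PySem.Int.toStr n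
            if all.contains variant then (p.1 ++ [variant], true) else p)
          (expanded, false)
        if p.2 = false then p.1 ++ [feature] else p.1
      else expanded ++ [feature]) acc
    = acc ++ sel.flatMap (pvSeg all) := by
  intro sel
  induction sel with
  | nil => intro acc; simp
  | cons feature t ih =>
    intro acc
    simp only [List.foldl_cons, List.flatMap_cons]
    rw [pvStepA_eq all feature acc, ih, List.append_assoc]

-- one iteration of B's output loop
lemma pvStepB_eq (v : PySem.Dict String (PySem.Set Char)) (feature : String) (acc : List String) :
    (if PySem.Str.endswith feature "_12h" && v.contains feature then
       (PySem.List.sorted (v.getD feature []) (fun x => x) false).foldl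
         (fun acc d => acc ++ [feature ++ "_" ++ String.ofList [d]]) acc
     else acc ++ [feature]) = acc ++ pvSegB v feature := by
  cases h : PySem.Str.endswith feature "_12h" && v.contains feature with
  | true =>
    rw [if_pos rfl, PySem.List.foldl_append_singleton_eq_map]
    unfold pvSegB
    rw [if_pos h]
  | false =>
    rw [if_neg (by simp)]
    unfold pvSegB
    rw [if_neg (by rw [h]; simp)]

-- B's output loop appends pvSegB per feature
lemma pvFoldB (v : PySem.Dict String (PySem.Set Char)) :
    ∀ (sel : List String) (acc : List String),
    sel.foldl (fun acc feature =>
      if PySem.Str.endswith feature "_12h" && v.contains feature then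
        (PySem.List.sorted (v.getD feature []) (fun x => x) false).foldl
          (fun acc d => acc ++ [feature ++ "_" ++ String.ofList [d]]) acc
      else acc ++ [feature]) acc
    = acc ++ sel.flatMap (pvSegB v) := by
  intro sel
  induction sel with
  | nil => intro acc; simp
  | cons feature t ih =>
    intro acc
    simp only [List.foldl_cons, List.flatMap_cons]
    rw [pvStepB_eq v feature acc, ih, List.append_assoc]

-- forward surgery: a string passing pvCheck is base ++ "_" ++ digit
lemma pvCheck_shape (cs : List Char) (h : pvCheck cs = true) :
    ∃ c, (PySem.List.pyGet? cs (-1)).getD ' ' = c ∧ cs = pvBase cs ++ ['_', c] ∧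
      c ∈ pvDigits ∧ PySem.Chars.endswith (pvBase cs) "_12h".toList = true := by
  simp only [pvCheck, Bool.and_eq_true, beq_iff_eq, decide_eq_true_eq] at h
  obtain ⟨⟨⟨hlen, hu⟩, hc⟩, hend⟩ := h
  obtain ⟨c, hc1, hc2⟩ : ∃ c, PySem.List.pyGet? cs (-1) = some c ∧ ("123456".toList.contains c) = true := by
    cases hg : PySem.List.pyGet? cs (-1) with
    | none => rw [hg] at hc; simp at hc
    | some c => rw [hg] at hc; exact ⟨c, rfl, hc⟩
  have hbase : pvBase cs = cs.take (cs.length - 2) := by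
    simpa [pvBase] using PySem.List.slice_to_neg_ofNat cs 2 (by omega)
  have hu' : PySem.List.pyGet? cs (-2) = cs[cs.length - 2]? :=
    PySem.List.pyGet?_neg_ofNat cs 2 (by omega) (by exact_mod_cast (by omega : (2:Int) ≤ (cs.length:Int)))
  obtain ⟨a, b, hab⟩ : ∃ a b, cs.drop (cs.length - 2) = [a, b] := by
    have hl : (cs.drop (cs.length - 2)).length = 2 := by
      rw [List.length_drop]; omega
    match hd : cs.drop (cs.length - 2) with
    | [a, b] => exact ⟨a, b, rfl⟩
    | [] => rw [hd] at hl; simp at hl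
    | [a] => rw [hd] at hl; simp at hl
    | a :: b :: x :: r => rw [hd] at hl; simp at hl
  have e0 : cs[cs.length - 2 + 0]? = some a := by
    rw [← List.getElem?_drop, hab]; rfl
  have e1 : cs[cs.length - 2 + 1]? = some b := by
    rw [← List.getElem?_drop, hab]; rfl
  have ha : a = '_' := by
    have h1 : cs[cs.length - 2]? = some a := by simp at e0; exact e0
    rw [hu', h1] at hu
    exact Option.some_inj.mp hu
  have hb : b = c := by
    have hl1 : cs.length - 2 + 1 = cs.length - 1 := by omega
    rw [hl1] at e1
    rw [PySem.List.pyGet?_neg_one, List.getLast?_eq_getElem?, e1] at hc1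
    exact Option.some_inj.mp hc1
  refine ⟨c, by rw [hc1]; rfl, ?_, ?_, hend⟩
  · conv_lhs => rw [← List.take_append_drop (cs.length - 2) cs]
    rw [hab, ha, hb, hbase]
  · simpa [pvDigits, List.contains_iff_mem] using hc2

-- backward surgery: base ++ "_" ++ digit passes pvCheck
lemma pvCheck_of_shape (bs : List Char) (c : Char) (hc : c ∈ pvDigits)
    (hend : PySem.Chars.endswith bs "_12h".toList = true) :
    pvCheck (bs ++ ['_', c]) = true ∧ pvBase (bs ++ ['_', c]) = bs ∧
    (PySem.List.pyGet? (bs ++ ['_', c]) (-1)).getD ' ' = c := by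
  have hlen : (bs ++ ['_', c]).length = bs.length + 2 := by simp
  have hbase : pvBase (bs ++ ['_', c]) = bs := by
    have := PySem.List.slice_to_neg_ofNat (bs ++ ['_', c]) 2 (by omega)
    rw [pvBase, this, hlen]
    simpa using List.take_left' rfl
  have hlast : PySem.List.pyGet? (bs ++ ['_', c]) (-1) = some c := by
    have he : bs ++ ['_', c] = (bs ++ ['_']) ++ [c] := by
      rw [List.append_assoc]; rfl
    rw [he]
    exact PySem.List.pyGet?_neg_one_append_singleton _ _
  have hm2 : PySem.List.pyGet? (bs ++ ['_', c]) (-2) = some '_' := by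
    have h := PySem.List.pyGet?_neg_ofNat (bs ++ ['_', c]) 2 (by omega)
      (by rw [hlen]; exact_mod_cast (by omega : (2:Int) ≤ (bs.length:Int) + 2))
    rw [h, hlen]
    simp
  have hc' : ("123456".toList.contains c) = true := by
    simpa [pvDigits, List.contains_iff_mem] using hc
  refine ⟨?_, hbase, by rw [hlast]; rfl⟩
  simp [pvCheck, hbase, hlast, hm2, hlen]
  exact ⟨by simpa [pvDigits] using hc, hend⟩

-- membership in the index built by B's first pass
lemma pvMemFold (l : List String) :
    ∀ (d : PySem.Dict String (PySem.Set Char)) (b : String) (c : Char),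
    (c ∈ (l.foldl pvStep d).getD b [] ↔
      c ∈ d.getD b [] ∨ ∃ f, f ∈ l ∧ pvCheck f.toList = true ∧
        String.ofList (pvBase f.toList) = b ∧ (PySem.List.pyGet? f.toList (-1)).getD ' ' = c) := by
  induction l with
  | nil => intro d b c; simp
  | cons f t ih =>
    intro d b c
    simp only [List.foldl_cons]
    rw [ih]
    by_cases hch : pvCheck f.toList = true
    · simp only [pvStep, hch, if_pos]
      by_cases hb : b = String.ofList (pvBase f.toList)
      · subst hb
        rw [PySem.Dict.getD_modify, if_pos rfl, PySem.Set.mem_add]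
        constructor
        · rintro (h | h)
          · rcases h with h | h
            · exact Or.inl h
            · exact Or.inr ⟨f, List.mem_cons_self .., hch, rfl, h.symm⟩
          · exact Or.inr (h.imp fun f' ⟨hf, rest⟩ => ⟨List.mem_cons_of_mem _ hf, rest⟩)
        · rintro (h | ⟨f', hf', hck', hkey', hdig'⟩)
          · exact Or.inl (Or.inl h)
          · rcases List.mem_cons.mp hf' with rfl | hf'
            · exact Or.inl (Or.inr hdig'.symm)
            · exact Or.inr ⟨f', hf', hck', hkey', hdig'⟩
      · rw [PySem.Dict.getD_modify, if_neg hb]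
        constructor
        · rintro (h | h)
          · exact Or.inl h
          · exact Or.inr (h.imp fun f' ⟨hf, rest⟩ => ⟨List.mem_cons_of_mem _ hf, rest⟩)
        · rintro (h | ⟨f', hf', hck', hkey', hdig'⟩)
          · exact Or.inl h
          · rcases List.mem_cons.mp hf' with rfl | hf'
            · exact absurd hkey'.symm hb
            · exact Or.inr ⟨f', hf', hck', hkey', hdig'⟩
    · simp only [pvStep, hch, Bool.false_eq_true, if_false]
      constructor
      · rintro (h | h)
        · exact Or.inl h
        · exact Or.inr (h.imp fun f' ⟨hf, rest⟩ => ⟨List.mem_cons_of_mem _ hf, rest⟩)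
      · rintro (h | ⟨f', hf', hck', hkey', hdig'⟩)
        · exact Or.inl h
        · rcases List.mem_cons.mp hf' with rfl | hf'
          · exact absurd hck' hch
          · exact Or.inr ⟨f', hf', hck', hkey', hdig'⟩

-- key membership in the index built by B's first pass
lemma pvContainsFold (l : List String) :
    ∀ (d : PySem.Dict String (PySem.Set Char)) (b : String),
    ((l.foldl pvStep d).contains b = true ↔
      d.contains b = true ∨ ∃ f, f ∈ l ∧ pvCheck f.toList = true ∧
        String.ofList (pvBase f.toList) = b) := by
  induction l with
  | nil => intro d b; simp
  | cons f t ih =>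
    intro d b
    simp only [List.foldl_cons]
    rw [ih]
    by_cases hch : pvCheck f.toList = true
    · simp only [pvStep, hch, if_pos]
      rw [PySem.Dict.contains_modify]
      simp only [Bool.or_eq_true, beq_iff_eq]
      constructor
      · rintro ((h | h) | h)
        · exact Or.inr ⟨f, List.mem_cons_self .., hch, h.symm⟩
        · exact Or.inl h
        · exact Or.inr (h.imp fun f' ⟨hf, rest⟩ => ⟨List.mem_cons_of_mem _ hf, rest⟩)
      · rintro (h | ⟨f', hf', hck', hkey'⟩)
        · exact Or.inl (Or.inr h)
        · rcases List.mem_cons.mp hf' with rfl | hf'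
          · exact Or.inl (Or.inl hkey'.symm)
          · exact Or.inr ⟨f', hf', hck', hkey'⟩
    · simp only [pvStep, hch, Bool.false_eq_true, if_false]
      constructor
      · rintro (h | h)
        · exact Or.inl h
        · exact Or.inr (h.imp fun f' ⟨hf, rest⟩ => ⟨List.mem_cons_of_mem _ hf, rest⟩)
      · rintro (h | ⟨f', hf', hck', hkey'⟩)
        · exact Or.inl h
        · rcases List.mem_cons.mp hf' with rfl | hf'
          · exact absurd hck' hch
          · exact Or.inr ⟨f', hf', hck', hkey'⟩

-- the stored digit sets have no duplicates
lemma pvNodupFold (l : List String) :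
    ∀ (d : PySem.Dict String (PySem.Set Char)) (b : String),
    (d.getD b []).Nodup → ((l.foldl pvStep d).getD b []).Nodup := by
  induction l with
  | nil => intro d b h; simpa using h
  | cons f t ih =>
    intro d b h
    simp only [List.foldl_cons]
    apply ih
    by_cases hch : pvCheck f.toList = true
    · simp only [pvStep, hch, if_pos]
      rw [PySem.Dict.getD_modify]
      split_ifs with hb
      · exact PySem.Set.nodup_add _ _ (hb ▸ h)
      · exact h
    · simpa [pvStep, hch] using h

-- for a feature ending in _12h, the indexed digits are exactly those whose variant occurs
lemma pvMemIndex (all : List String) (f : String)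
    (hend : PySem.Str.endswith f "_12h" = true) (c : Char) :
    c ∈ (all.foldl pvStep PySem.Dict.empty).getD f [] ↔
      c ∈ pvDigits ∧ pvHas all f c = true := by
  rw [pvMemFold]
  simp only [PySem.Dict.getD_empty, List.not_mem_nil, false_or]
  constructor
  · rintro ⟨f', hf', hck', hkey', hdig'⟩
    obtain ⟨c0, hdig0, hsh, hdg, _⟩ := pvCheck_shape f'.toList hck'
    have hcc : c0 = c := hdig0.symm.trans hdig'
    subst hcc
    have hbl : pvBase f'.toList = f.toList := by
      have := congrArg String.toList hkey'
      simpa using this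
    have hfeq : f' = pvVar f c0 := by
      apply String.toList_inj.mp
      rw [hsh, hbl]
      simp [pvVar]
    refine ⟨hdg, ?_⟩
    show all.contains (pvVar f c0) = true
    rw [List.contains_iff_mem, ← hfeq]
    exact hf'
  · rintro ⟨hdg, hhas⟩
    have hend' : PySem.Chars.endswith f.toList "_12h".toList = true := by
      rw [← PySem.Str.endswith_eq]; exact hend
    obtain ⟨h1, h2, h3⟩ := pvCheck_of_shape f.toList c hdg hend'
    have htl : (pvVar f c).toList = f.toList ++ ['_', c] := by simp [pvVar]
    refine ⟨pvVar f c, List.contains_iff_mem.mp hhas, ?_, ?_, ?_⟩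
    · rw [htl]; exact h1
    · rw [htl, h2]; exact String.ofList_toList
    · rw [htl]; exact h3

-- for a feature ending in _12h, the index has the key iff some variant occurs
lemma pvContainsIndex (all : List String) (f : String)
    (hend : PySem.Str.endswith f "_12h" = true) :
    (all.foldl pvStep PySem.Dict.empty).contains f = pvDigits.any (pvHas all f) := by
  rw [Bool.eq_iff_iff, pvContainsFold]
  simp only [PySem.Dict.contains_empty, Bool.false_eq_true, false_or, List.any_eq_true]
  constructor
  · rintro ⟨f', hf', hck', hkey'⟩
    obtain ⟨c0, hdig0, hsh, hdg, _⟩ := pvCheck_shape f'.toList hck'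
    have hbl : pvBase f'.toList = f.toList := by
      have := congrArg String.toList hkey'
      simpa using this
    have hfeq : f' = pvVar f c0 := by
      apply String.toList_inj.mp
      rw [hsh, hbl]
      simp [pvVar]
    refine ⟨c0, hdg, ?_⟩
    show all.contains (pvVar f c0) = true
    rw [List.contains_iff_mem, ← hfeq]
    exact hf'
  · rintro ⟨c, hdg, hhas⟩
    have hend' : PySem.Chars.endswith f.toList "_12h".toList = true := by
      rw [← PySem.Str.endswith_eq]; exact hend
    obtain ⟨h1, h2, _⟩ := pvCheck_of_shape f.toList c hdg hend'
    have htl : (pvVar f c).toList = f.toList ++ ['_', c] := by simp [pvVar]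
    refine ⟨pvVar f c, ?_, ?_, ?_⟩
    · exact List.contains_iff_mem.mp hhas
    · rw [htl]; exact h1
    · rw [htl, h2]; exact String.ofList_toList

-- sorting the indexed digit set lists the matching digits in ascending order
lemma pvSortedIndex (all : List String) (f : String)
    (hend : PySem.Str.endswith f "_12h" = true) :
    PySem.List.sorted ((all.foldl pvStep PySem.Dict.empty).getD f []) (fun x => x) false
    = pvDigits.filter (pvHas all f) := by
  apply PySem.List.sorted_eq_of_perm_of_pairwise_lt
  · apply (List.perm_ext_iff_of_nodup ?_ ?_).mpr
    · intro c
      rw [List.mem_filter, pvMemIndex all f hend c]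
    · exact (by decide : pvDigits.Nodup).filter _
    · exact pvNodupFold all PySem.Dict.empty f (by simp)
  · exact List.Pairwise.filter _ (by decide : pvDigits.Pairwise (· < ·))

-- per-feature: A's contribution equals B's contribution
lemma pvSeg_eq (all : List String) (f : String) :
    pvSeg all f = pvSegB (all.foldl pvStep PySem.Dict.empty) f := by
  cases hend : PySem.Str.endswith f "_12h" with
  | true =>
    have hc := pvContainsIndex all f hend
    unfold pvSeg pvSegB
    rw [if_pos hend, hc, hend]
    simp only [Bool.true_and]
    cases hany : pvDigits.any (pvHas all f) with
    | true =>
      rw [if_pos rfl, if_pos rfl, pvSortedIndex all f hend]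
      rfl
    | false =>
      rw [if_neg (by simp), if_neg (by simp)]
  | false =>
    unfold pvSeg pvSegB
    rw [if_neg (by rw [hend]; simp), if_neg (by rw [hend]; simp)]

-- ===== VERDICT (by name: the statement is the Claim_ definition above) =====
theorem expand_12h_features_spec : Claim_equal_expand_12h_features := by
  intro sel all _
  unfold Spec_expand_12h_features expand_12h_features expand_12h_features_alt
  simp only []
  rw [pvFoldA all sel [], pvFoldB (all.foldl pvStep PySem.Dict.empty) sel []]
  have : pvSeg all = pvSegB (all.foldl pvStep PySem.Dict.empty) := funext (pvSeg_eq all)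
  rw [this]
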